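-- pv_equiv track=rewrite | github.com/PashcalE2/CS | hw/main.py | dif_m2_encode
-- ===== SOURCE A (Python) =====
-- def dif_m2_encode(data):
--     encoded_data = []
--     previous_bit = 1
--     for bit in data:
--         if bit == 0:
--             encoded_data.extend([1 if previous_bit == 0 else -1, -1 if previous_bit == 0 else 1])
--         else:
--             encoded_data.extend([-1 if previous_bit == 0 else 1, 1 if previous_bit == 0 else -1])
--             previous_bit = 1 if previous_bit == 0 else 0
--     return encoded_data
-- ===== SOURCE B (Python) =====
-- def dif_m2_encode(data):
--     # pass 1: running state before each bit (toggles on every non-zero bit)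
--     states = []
--     s = 1
--     for b in data:
--         states.append(s)
--         if b != 0:
--             s = 1 - s
--     # pass 2: each bit's two symbols from (bit, state), flattened
--     pairs = [[1, -1] if s == (0 if b == 0 else 1) else [-1, 1]
--              for b, s in zip(data, states)]
--     return [v for p in pairs for v in p]
-- ===== Notes on version B (the rewrite author's own statement) =====
-- stated objective: alternative
-- what changed: B replaces A's single stateful loop that appends symbol pairs and mutates previous_bit inline by two separate passes: first a scan computing the running toggle state before each bit, then a stateless comprehension over zip(data, states) that derives each pair from (bit, state) and flattens.
import Mathlib
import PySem

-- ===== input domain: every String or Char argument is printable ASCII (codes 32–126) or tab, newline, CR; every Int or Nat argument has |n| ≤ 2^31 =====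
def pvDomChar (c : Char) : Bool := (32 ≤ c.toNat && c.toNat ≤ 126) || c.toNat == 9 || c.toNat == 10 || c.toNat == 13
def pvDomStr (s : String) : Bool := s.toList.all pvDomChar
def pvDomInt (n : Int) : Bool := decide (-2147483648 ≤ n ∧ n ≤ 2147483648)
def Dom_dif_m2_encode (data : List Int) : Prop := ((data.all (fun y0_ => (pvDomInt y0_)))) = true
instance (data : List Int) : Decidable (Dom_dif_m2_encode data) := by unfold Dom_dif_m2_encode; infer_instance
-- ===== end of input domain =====

-- B differs from A by decomposition only (same O(n) cost): state scan then stateless pair emission.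

-- ===== PORT A =====
-- the for-loop of A as structural recursion over data, carrying (encoded_data, previous_bit)
def pvALoop : List Int → List Int → Int → List Int
  | acc, [], _ => acc
  | acc, bit :: rest, prev =>
    if bit == 0 then
      pvALoop (acc ++ [if prev == 0 then (1 : Int) else -1, if prev == 0 then (-1 : Int) else 1]) rest prev
    else
      pvALoop (acc ++ [if prev == 0 then (-1 : Int) else 1, if prev == 0 then (1 : Int) else -1]) rest
        (if prev == 0 then 1 else 0)

def dif_m2_encode (data : List Int) : List Int := pvALoop [] data 1

-- ===== PORT B =====
-- pass 1 of B: the list of running states (toggles on every non-zero bit)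
def pvStates : Int → List Int → List Int
  | _, [] => []
  | s, b :: rest => s :: pvStates (if b != 0 then 1 - s else s) rest

-- pass 2 of B: per-bit pair from (bit, state), then flatten
def pvPair (p : Int × Int) : List Int :=
  if p.2 == (if p.1 == 0 then (0 : Int) else 1) then [1, -1] else [-1, 1]

def dif_m2_encode_alt (data : List Int) : List Int :=
  ((data.zip (pvStates 1 data)).map pvPair).flatten

-- ===== PRECONDITION & SPEC =====
def Spec_dif_m2_encode (data : List Int) (out : List Int) : Prop := out = dif_m2_encode_alt data
instance (data : List Int) (out : List Int) : Decidable (Spec_dif_m2_encode data out) := by unfold Spec_dif_m2_encode; infer_instance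

-- ===== CLAIM (what is proved, stated in full; the proofs are below) =====
def Claim_equal_dif_m2_encode : Prop := ∀ (data : List Int), Dom_dif_m2_encode data → Spec_dif_m2_encode data (dif_m2_encode data)

-- ===== LEMMAS AND PROOFS =====
theorem pvALoop_append (acc : List Int) (data : List Int) (prev : Int) :
    pvALoop acc data prev = acc ++ pvALoop [] data prev := by
  induction data generalizing acc prev with
  | nil => simp [pvALoop]
  | cons b rest ih =>
    simp only [pvALoop]
    split_ifs <;> (rw [ih, ih ([] ++ _)]; simp)

theorem pvALoop_eq_alt (data : List Int) (s : Int) (hs : s = 0 ∨ s = 1) :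
    pvALoop [] data s = ((data.zip (pvStates s data)).map pvPair).flatten := by
  induction data generalizing s with
  | nil => simp [pvALoop, pvStates]
  | cons b rest ih =>
    rcases hs with rfl | rfl <;> by_cases hb : b = 0 <;>
      (simp only [pvALoop, pvStates]
       simp [hb]
       rw [pvALoop_append]
       simp [pvPair, hb, ih 0 (Or.inl rfl), ih 1 (Or.inr rfl)])

theorem dif_m2_encode_eq (data : List Int) :
    dif_m2_encode data = dif_m2_encode_alt data := by
  unfold dif_m2_encode dif_m2_encode_alt
  exact pvALoop_eq_alt data 1 (Or.inr rfl)

-- ===== VERDICT (by name: the statement is the Claim_ definition above) =====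
theorem dif_m2_encode_spec : Claim_equal_dif_m2_encode := by
  intro data _
  unfold Spec_dif_m2_encode
  exact dif_m2_encode_eq data
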